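-- pv_equiv track=rewrite | github.com/slyfoxnoname/programming2025 | Hakaton/Task#2.py | get_balanced
-- ===== SOURCE A (Python) =====
-- def get_sums(p):
--     s =[]
--     m = len(p)
--     for mask in range(1 << m):
--         sm = 0
--         for i in range(m):
--             if mask & (1 << i):
--                 sm += p[i]
--         s.append(sm)
--     return s
--
-- def get_balanced(p):
--     s = get_sums(p)
--     st = set(s)
--     b = set()
--     for w in s:
--         if w % 2 == 0 and (w // 2) in st:
--             b.add(w)
--     return sorted(b)
-- ===== SOURCE B (Python) =====
-- def get_balanced(p):
--     # incremental doubling: set of all subset sums, built one element at a time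
--     sums = {0}
--     for x in p:
--         sums |= {s + x for s in sums}
--     return sorted(w for w in sums if w % 2 == 0 and w // 2 in sums)
-- ===== Notes on version B (the rewrite author's own statement) =====
-- stated objective: faster
-- what changed: Replaces the per-mask bit loop over all 2^m masks with incremental doubling of a subset-sum set (sums |= sums+x per element), and filters that deduplicated set directly.
import Mathlib
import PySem

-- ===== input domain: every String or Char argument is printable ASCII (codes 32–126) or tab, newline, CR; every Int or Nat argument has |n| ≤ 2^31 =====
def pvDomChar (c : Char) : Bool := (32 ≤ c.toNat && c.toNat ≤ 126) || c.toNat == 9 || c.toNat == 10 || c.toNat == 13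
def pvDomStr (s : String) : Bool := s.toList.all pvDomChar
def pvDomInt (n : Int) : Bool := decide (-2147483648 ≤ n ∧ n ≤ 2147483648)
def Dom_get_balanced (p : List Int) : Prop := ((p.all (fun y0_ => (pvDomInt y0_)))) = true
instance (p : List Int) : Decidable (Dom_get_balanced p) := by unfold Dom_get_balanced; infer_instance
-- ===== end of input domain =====

-- B replaces A's per-mask bit loop over all 2^m masks by incremental doubling of a subset-sum set (objective: faster).

-- ===== PORT A =====
-- for mask in range(1 << m): sm = sum of p[i] over the set bits of mask; s.append(sm)
def get_sums (p : List Int) : List Int :=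
  (List.range (1 <<< p.length)).foldl (fun s mask =>
    s ++ [(List.range p.length).foldl
            (fun sm i => if mask &&& (1 <<< i) ≠ 0 then sm + p.getD i 0 else sm) 0]) []

def get_balanced (p : List Int) : List Int :=
  let s := get_sums p
  let st := PySem.Set.ofList s
  let b := s.foldl (fun b w =>
    if PySem.Int.mod w 2 == 0 && PySem.Set.contains st (PySem.Int.floordiv w 2)
    then PySem.Set.add b w else b) PySem.Set.empty
  PySem.List.sorted b (fun x => x) false

-- ===== PORT B =====
-- sums = {0}; for x in p: sums |= {s + x for s in sums}; sorted(w for w in sums if w % 2 == 0 and w // 2 in sums)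
def get_balanced_alt (p : List Int) : List Int :=
  let sums := p.foldl (fun sums x => PySem.Set.union sums (sums.map (· + x)))
                      (PySem.Set.ofList [0])
  PySem.List.sorted
    (sums.filter (fun w =>
      PySem.Int.mod w 2 == 0 && PySem.Set.contains sums (PySem.Int.floordiv w 2)))
    (fun x => x) false

-- ===== PRECONDITION & SPEC =====
def Spec_get_balanced (p : List Int) (out : List Int) : Prop := out = get_balanced_alt p
instance (p : List Int) (out : List Int) : Decidable (Spec_get_balanced p out) := by unfold Spec_get_balanced; infer_instance

-- ===== CLAIM (what is proved, stated in full; the proofs are below) =====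
def Claim_equal_get_balanced : Prop := ∀ (p : List Int), Dom_get_balanced p → Spec_get_balanced p (get_balanced p)

-- ===== LEMMAS AND PROOFS =====

-- mask & (1 << i) != 0  is exactly bit i of mask
theorem pv_and_shift_ne (mask i : Nat) : (mask &&& (1 <<< i) ≠ 0) ↔ mask.testBit i := by
  rw [Nat.one_shiftLeft, Nat.and_two_pow]
  cases h : mask.testBit i <;> simp [Nat.pow_eq_zero]

-- the inner bit loop of A, with the condition phrased as testBit
def pvInner (p : List Int) (mask : Nat) : Int :=
  (List.range p.length).foldl (fun sm i => if mask.testBit i then sm + p.getD i 0 else sm) 0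

theorem get_sums_eq_map (p : List Int) :
    get_sums p = (List.range (2 ^ p.length)).map (pvInner p) := by
  unfold get_sums
  rw [Nat.one_shiftLeft, PySem.List.foldl_append_singleton_eq_map, List.nil_append]
  refine List.map_congr_left (fun mask _ => ?_)
  unfold pvInner
  simp only [pv_and_shift_ne]

theorem pvInner_low (p : List Int) (a : Int) (mask : Nat) (h : mask < 2 ^ p.length) :
    pvInner (p ++ [a]) mask = pvInner p mask := by
  unfold pvInner
  simp only [List.length_append, List.length_singleton, List.range_succ, List.foldl_append]
  rw [List.foldl_cons, List.foldl_nil, Nat.testBit_lt_two_pow h, if_neg (by simp)]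
  exact PySem.List.foldl_congr_mem _ _ _ _ (fun sm i hi => by
    rw [List.getD_append _ _ _ _ (List.mem_range.mp hi)])

theorem pvInner_high (p : List Int) (a : Int) (mask : Nat) (h : mask < 2 ^ p.length) :
    pvInner (p ++ [a]) (2 ^ p.length + mask) = pvInner p mask + a := by
  unfold pvInner
  simp only [List.length_append, List.length_singleton, List.range_succ, List.foldl_append]
  rw [List.foldl_cons, List.foldl_nil, Nat.testBit_two_pow_add_eq,
      Nat.testBit_lt_two_pow h, if_pos (by simp)]
  have hget : (p ++ [a]).getD p.length 0 = a := by
    simp [List.getD]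
  rw [hget]
  congr 1
  exact PySem.List.foldl_congr_mem _ _ _ _ (fun sm i hi => by
    rw [Nat.testBit_two_pow_add_gt (List.mem_range.mp hi),
        List.getD_append _ _ _ _ (List.mem_range.mp hi)])

-- appending one element doubles A's sum list: old sums, then old sums shifted by a
theorem get_sums_concat (p : List Int) (a : Int) :
    get_sums (p ++ [a]) = get_sums p ++ (get_sums p).map (· + a) := by
  rw [get_sums_eq_map, get_sums_eq_map]
  have hlen : (p ++ [a]).length = p.length + 1 := by simp
  rw [hlen, pow_succ, mul_two, List.range_add, List.map_append, List.map_map, List.map_map]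
  congr 1
  · exact List.map_congr_left (fun mask hm => pvInner_low p a mask (List.mem_range.mp hm))
  · exact List.map_congr_left (fun mask hm => by
      simpa using pvInner_high p a mask (List.mem_range.mp hm))

-- B's incremental subset-sum set
def pvSums (p : List Int) : PySem.Set Int :=
  p.foldl (fun sums x => PySem.Set.union sums (sums.map (· + x))) (PySem.Set.ofList [0])

theorem nodup_pvSums_aux (p : List Int) (s : PySem.Set Int) (h : s.Nodup) :
    (p.foldl (fun sums x => PySem.Set.union sums (sums.map (· + x))) s).Nodup := by
  induction p generalizing s with
  | nil => exact h
  | cons x xs ih => exact ih _ (PySem.Set.nodup_union _ _ h)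

theorem nodup_pvSums (p : List Int) : (pvSums p).Nodup :=
  nodup_pvSums_aux p _ (PySem.Set.nodup_ofList _)

-- B's set holds exactly the values of A's sum list
theorem mem_pvSums (p : List Int) : ∀ y : Int, y ∈ pvSums p ↔ y ∈ get_sums p := by
  induction p using List.reverseRecOn with
  | nil => intro y; rfl
  | append_singleton q a ih =>
    intro y
    unfold pvSums at *
    rw [List.foldl_append, List.foldl_cons, List.foldl_nil, get_sums_concat]
    rw [PySem.Set.mem_union, List.mem_append, ih y, List.mem_map, List.mem_map]
    constructor
    · rintro (h | ⟨t, ht, rfl⟩)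
      · exact Or.inl h
      · exact Or.inr ⟨t, (ih t).mp ht, rfl⟩
    · rintro (h | ⟨t, ht, rfl⟩)
      · exact Or.inl h
      · exact Or.inr ⟨t, (ih t).mpr ht, rfl⟩

-- A's conditional set-building loop: membership and nodup
theorem mem_foldl_add_if (c : Int → Bool) (l : List Int) (s : PySem.Set Int) (y : Int) :
    y ∈ l.foldl (fun b w => if c w then PySem.Set.add b w else b) s ↔
      y ∈ s ∨ (y ∈ l ∧ c y = true) := by
  induction l generalizing s with
  | nil => simp
  | cons x xs ih =>
    rw [List.foldl_cons, ih]
    by_cases hx : c x = true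
    · rw [if_pos hx]
      simp only [PySem.Set.mem_add, List.mem_cons]
      constructor
      · rintro (⟨h | rfl⟩ | h)
        · exact Or.inl h
        · exact Or.inr ⟨Or.inl rfl, hx⟩
        · exact Or.inr ⟨Or.inr h.1, h.2⟩
      · rintro (h | ⟨rfl | h, hc⟩)
        · exact Or.inl (Or.inl h)
        · exact Or.inl (Or.inr rfl)
        · exact Or.inr ⟨h, hc⟩
    · rw [if_neg hx]
      simp only [List.mem_cons]
      constructor
      · rintro (h | h)
        · exact Or.inl h
        · exact Or.inr ⟨Or.inr h.1, h.2⟩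
      · rintro (h | ⟨rfl | h, hc⟩)
        · exact Or.inl h
        · exact absurd hc hx
        · exact Or.inr ⟨h, hc⟩

theorem nodup_foldl_add_if (c : Int → Bool) (l : List Int) (s : PySem.Set Int) (h : s.Nodup) :
    (l.foldl (fun b w => if c w then PySem.Set.add b w else b) s).Nodup := by
  induction l generalizing s with
  | nil => exact h
  | cons x xs ih =>
    rw [List.foldl_cons]
    by_cases hx : c x = true
    · rw [if_pos hx]; exact ih _ (PySem.Set.nodup_add _ _ h)
    · rw [if_neg hx]; exact ih _ h

-- ===== VERDICT (by name: the statement is the Claim_ definition above) =====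
theorem get_balanced_spec : Claim_equal_get_balanced := by
  intro p _
  show get_balanced p = get_balanced_alt p
  unfold get_balanced get_balanced_alt
  simp only []
  refine PySem.List.sorted_eq_sorted_of_perm _ _ _ (fun a b h => h) ?_
  rw [show (p.foldl (fun sums x => PySem.Set.union sums (sums.map (· + x)))
        (PySem.Set.ofList [0])) = pvSums p from rfl]
  refine (List.perm_ext_iff_of_nodup
        (nodup_foldl_add_if _ _ _ List.nodup_nil)
        (List.Nodup.filter _ (nodup_pvSums p))).mpr ?_
  intro y
  rw [mem_foldl_add_if, List.mem_filter, mem_pvSums]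
  simp only [List.not_mem_nil, false_or, Bool.and_eq_true,
    PySem.Set.contains_iff, PySem.Set.mem_ofList, mem_pvSums]
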